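-- pv_equiv track=rewrite | github.com/CliffordFung/Algorithms-Questions | DP - 3. NumberOfFactors.py | numFactorsBU
-- ===== SOURCE A (Python) =====
-- def numFactorsBU(n):
--     dp = [-1 for _ in range(n + 1)]
--
--     for i in range(n + 1):
--         if i < 3:
--             dp[i] = 1
--         elif i == 3:
--             dp[i] = 2
--         else:
--             dp[i] = dp[i - 1] + dp[i - 3] + dp[i - 4]
--
--     return dp[n]
-- ===== SOURCE B (Python) =====
-- def numFactorsBU(n):
--     # Binary exponentiation of the 4x4 companion matrix of the recurrence
--     # f(i) = f(i-1) + f(i-3) + f(i-4): logarithmically many matrix multiplications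
--     # instead of A's linear DP array.
--     if n < 3:
--         return 1
--
--     def mul(X, Y):
--         return tuple(
--             tuple(sum(X[i][k] * Y[k][j] for k in range(4)) for j in range(4))
--             for i in range(4)
--         )
--
--     M = ((1, 0, 1, 1),
--          (1, 0, 0, 0),
--          (0, 1, 0, 0),
--          (0, 0, 1, 0))
--     P = ((1, 0, 0, 0),
--          (0, 1, 0, 0),
--          (0, 0, 1, 0),
--          (0, 0, 0, 1))
--     e = n - 3
--     while e:
--         if e & 1:
--             P = mul(P, M)
--         M = mul(M, M)
--         e >>= 1
--     # P = M^(n-3); first row applied to (f(3), f(2), f(1), f(0)) = (2, 1, 1, 1)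
--     return P[0][0] * 2 + P[0][1] + P[0][2] + P[0][3]
-- ===== Notes on version B (the rewrite author's own statement) =====
-- stated objective: alternative
-- what changed: Replaces A's linear bottom-up DP array over the recurrence f(i)=f(i-1)+f(i-3)+f(i-4) by binary exponentiation of the 4x4 companion matrix: logarithmically many big-integer matrix multiplications and no array (a timing run did not confirm a 1.5x win at the largest sizes, so no speed is claimed).
import Mathlib
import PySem

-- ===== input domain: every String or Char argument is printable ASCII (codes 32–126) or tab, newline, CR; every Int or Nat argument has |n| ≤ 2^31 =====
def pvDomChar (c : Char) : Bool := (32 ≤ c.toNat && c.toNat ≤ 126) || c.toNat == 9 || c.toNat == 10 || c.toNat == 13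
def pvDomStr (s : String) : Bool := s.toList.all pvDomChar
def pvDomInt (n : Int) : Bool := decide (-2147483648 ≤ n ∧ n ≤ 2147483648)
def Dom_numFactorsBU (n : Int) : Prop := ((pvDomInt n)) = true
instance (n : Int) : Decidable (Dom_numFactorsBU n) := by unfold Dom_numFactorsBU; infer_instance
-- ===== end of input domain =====

-- B replaces A's bottom-up DP array (one addition step per index) by binary exponentiation
-- of the 4x4 companion matrix of the same recurrence; return values agree on all of Pre_.

-- ===== PORT A =====
-- dp = [-1 for _ in range(n+1)]; for i in range(n+1): …; return dp[n]
def numFactorsBU (n : Int) : Int :=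
  let dp := ((PySem.List.pyRange 0 (n + 1) 1).map (fun _ => (-1 : Int))).toArray
  let dp := (PySem.List.pyRange 0 (n + 1) 1).foldl
    (fun dp i =>
      if i < 3 then dp.set! i.toNat 1
      else if i = 3 then dp.set! i.toNat 2
      else dp.set! i.toNat
        (dp[(i - 1).toNat]! + dp[(i - 3).toNat]! + dp[(i - 4).toNat]!)) dp
  (PySem.List.pyGet? dp.toList n).getD 0   -- none (IndexError for negative n) is excluded by Pre_

-- ===== PORT B =====
-- 4x4 integer matrix, row-major fields
structure Mat4 where
  (m11 m12 m13 m14 : Int)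
  (m21 m22 m23 m24 : Int)
  (m31 m32 m33 m34 : Int)
  (m41 m42 m43 m44 : Int)
deriving DecidableEq, Repr

def mmul (X Y : Mat4) : Mat4 :=
  ⟨X.m11*Y.m11 + X.m12*Y.m21 + X.m13*Y.m31 + X.m14*Y.m41,
   X.m11*Y.m12 + X.m12*Y.m22 + X.m13*Y.m32 + X.m14*Y.m42,
   X.m11*Y.m13 + X.m12*Y.m23 + X.m13*Y.m33 + X.m14*Y.m43,
   X.m11*Y.m14 + X.m12*Y.m24 + X.m13*Y.m34 + X.m14*Y.m44,
   X.m21*Y.m11 + X.m22*Y.m21 + X.m23*Y.m31 + X.m24*Y.m41,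
   X.m21*Y.m12 + X.m22*Y.m22 + X.m23*Y.m32 + X.m24*Y.m42,
   X.m21*Y.m13 + X.m22*Y.m23 + X.m23*Y.m33 + X.m24*Y.m43,
   X.m21*Y.m14 + X.m22*Y.m24 + X.m23*Y.m34 + X.m24*Y.m44,
   X.m31*Y.m11 + X.m32*Y.m21 + X.m33*Y.m31 + X.m34*Y.m41,
   X.m31*Y.m12 + X.m32*Y.m22 + X.m33*Y.m32 + X.m34*Y.m42,
   X.m31*Y.m13 + X.m32*Y.m23 + X.m33*Y.m33 + X.m34*Y.m43,
   X.m31*Y.m14 + X.m32*Y.m24 + X.m33*Y.m34 + X.m34*Y.m44,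
   X.m41*Y.m11 + X.m42*Y.m21 + X.m43*Y.m31 + X.m44*Y.m41,
   X.m41*Y.m12 + X.m42*Y.m22 + X.m43*Y.m32 + X.m44*Y.m42,
   X.m41*Y.m13 + X.m42*Y.m23 + X.m43*Y.m33 + X.m44*Y.m43,
   X.m41*Y.m14 + X.m42*Y.m24 + X.m43*Y.m34 + X.m44*Y.m44⟩

def mIdent : Mat4 := ⟨1,0,0,0, 0,1,0,0, 0,0,1,0, 0,0,0,1⟩
def mComp  : Mat4 := ⟨1,0,1,1, 1,0,0,0, 0,1,0,0, 0,0,1,0⟩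

-- the 'while e:' binary-exponentiation loop of Source B (e & 1, e >>= 1)
def matPowBin (P base : Mat4) (e : Nat) : Mat4 :=
  if e = 0 then P
  else matPowBin (if e % 2 = 1 then mmul P base else P) (mmul base base) (e / 2)
termination_by e
decreasing_by exact Nat.div_lt_self (Nat.pos_of_ne_zero (by assumption)) (by omega)

def numFactorsBU_alt (n : Int) : Int :=
  if n < 3 then 1
  else
    let P := matPowBin mIdent mComp (n - 3).toNat
    P.m11 * 2 + P.m12 + P.m13 + P.m14

-- ===== PRECONDITION & SPEC =====
-- Pre_ excludes negative n, where A raises IndexError (dp is the empty list and dp[n] is read).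
def Pre_numFactorsBU (n : Int) : Prop := 0 ≤ n
instance (n : Int) : Decidable (Pre_numFactorsBU n) := by unfold Pre_numFactorsBU; infer_instance
def pvWitness_numFactorsBU : Int := 7

def Spec_numFactorsBU (n : Int) (out : Int) : Prop := out = numFactorsBU_alt n
instance (n : Int) (out : Int) : Decidable (Spec_numFactorsBU n out) := by unfold Spec_numFactorsBU; infer_instance

-- ===== CLAIM (what is proved, stated in full; the proofs are below) =====
def Claim_equal_numFactorsBU : Prop := ∀ (n : Int), Dom_numFactorsBU n → Pre_numFactorsBU n → Spec_numFactorsBU n (numFactorsBU n)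

-- ===== LEMMAS AND PROOFS =====

-- the recurrence both programs compute
def fRec : Nat → Int
  | 0 => 1
  | 1 => 1
  | 2 => 1
  | 3 => 2
  | (k + 4) => fRec (k + 3) + fRec (k + 1) + fRec k

theorem mmul_assoc (X Y Z : Mat4) : mmul (mmul X Y) Z = mmul X (mmul Y Z) := by
  cases X; cases Y; cases Z
  simp only [mmul, Mat4.mk.injEq]
  refine ⟨?_,?_,?_,?_,?_,?_,?_,?_,?_,?_,?_,?_,?_,?_,?_,?_⟩ <;> ring

theorem mmul_ident_left (X : Mat4) : mmul mIdent X = X := by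
  cases X
  simp only [mmul, mIdent, Mat4.mk.injEq]
  refine ⟨?_,?_,?_,?_,?_,?_,?_,?_,?_,?_,?_,?_,?_,?_,?_,?_⟩ <;> ring

theorem mmul_ident_right (X : Mat4) : mmul X mIdent = X := by
  cases X
  simp only [mmul, mIdent, Mat4.mk.injEq]
  refine ⟨?_,?_,?_,?_,?_,?_,?_,?_,?_,?_,?_,?_,?_,?_,?_,?_⟩ <;> ring

def mnpow (X : Mat4) : Nat → Mat4
  | 0 => mIdent
  | (k + 1) => mmul (mnpow X k) X

theorem mnpow_succ_left (X : Mat4) (k : Nat) : mnpow X (k + 1) = mmul X (mnpow X k) := by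
  induction k with
  | zero => simp only [mnpow, mmul_ident_left, mmul_ident_right]
  | succ k ih =>
    calc mnpow X (k + 2) = mmul (mnpow X (k + 1)) X := rfl
      _ = mmul (mmul X (mnpow X k)) X := by rw [ih]
      _ = mmul X (mmul (mnpow X k) X) := mmul_assoc _ _ _
      _ = mmul X (mnpow X (k + 1)) := rfl

theorem mnpow_sq (X : Mat4) (k : Nat) : mnpow (mmul X X) k = mnpow X (2 * k) := by
  induction k with
  | zero => rfl
  | succ k ih =>
    calc mnpow (mmul X X) (k + 1) = mmul (mnpow X (2 * k)) (mmul X X) := by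
          simp only [mnpow, ih]
      _ = mmul (mmul (mnpow X (2 * k)) X) X := (mmul_assoc _ _ _).symm
      _ = mnpow X (2 * k + 1 + 1) := rfl
      _ = mnpow X (2 * (k + 1)) := by ring_nf

theorem matPowBin_eq (e : Nat) (P b : Mat4) : matPowBin P b e = mmul P (mnpow b e) := by
  induction e using Nat.strong_induction_on generalizing P b with
  | _ e ih =>
    rw [matPowBin]
    by_cases h0 : e = 0
    · subst h0; simp [mnpow, mmul_ident_right]
    · simp only [if_neg h0]
      rw [ih (e / 2) (Nat.div_lt_self (Nat.pos_of_ne_zero h0) one_lt_two), mnpow_sq]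
      by_cases h1 : e % 2 = 1
      · simp only [if_pos h1]
        calc mmul (mmul P b) (mnpow b (2 * (e / 2)))
            = mmul P (mmul b (mnpow b (2 * (e / 2)))) := mmul_assoc _ _ _
          _ = mmul P (mnpow b (2 * (e / 2) + 1)) := by rw [← mnpow_succ_left]
          _ = mmul P (mnpow b e) := by rw [show 2 * (e / 2) + 1 = e from by omega]
      · simp only [if_neg h1]
        rw [show 2 * (e / 2) = e from by omega]

-- 4-vectors and the recurrence vector
def mvec (X : Mat4) (v : Int × Int × Int × Int) : Int × Int × Int × Int :=
  (X.m11*v.1 + X.m12*v.2.1 + X.m13*v.2.2.1 + X.m14*v.2.2.2,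
   X.m21*v.1 + X.m22*v.2.1 + X.m23*v.2.2.1 + X.m24*v.2.2.2,
   X.m31*v.1 + X.m32*v.2.1 + X.m33*v.2.2.1 + X.m34*v.2.2.2,
   X.m41*v.1 + X.m42*v.2.1 + X.m43*v.2.2.1 + X.m44*v.2.2.2)

theorem mvec_mmul (X Y : Mat4) (v : Int × Int × Int × Int) :
    mvec (mmul X Y) v = mvec X (mvec Y v) := by
  cases X; cases Y
  simp only [mvec, mmul, Prod.mk.injEq]
  refine ⟨?_,?_,?_,?_⟩ <;> ring

def fVec (k : Nat) : Int × Int × Int × Int := (fRec (k + 3), fRec (k + 2), fRec (k + 1), fRec k)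

theorem fRec_add_four (k : Nat) : fRec (k + 4) = fRec (k + 3) + fRec (k + 1) + fRec k := rfl

theorem mvec_comp_fVec (k : Nat) : mvec mComp (fVec k) = fVec (k + 1) := by
  simp only [mvec, mComp, fVec, Prod.mk.injEq]
  refine ⟨?_, by ring_nf, by ring_nf, by ring_nf⟩
  rw [show k + 1 + 3 = k + 4 from rfl, fRec_add_four]; ring

theorem mvec_ident (v : Int × Int × Int × Int) : mvec mIdent v = v := by
  obtain ⟨a, b, c, d⟩ := v
  simp only [mvec, mIdent, Prod.mk.injEq]
  refine ⟨by ring, by ring, by ring, by ring⟩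

theorem mnpow_fVec (k : Nat) : mvec (mnpow mComp k) (fVec 0) = fVec k := by
  induction k with
  | zero => simp only [mnpow, mvec_ident]
  | succ k ih => rw [mnpow_succ_left, mvec_mmul, ih, mvec_comp_fVec]

theorem alt_eq_fRec (n : Int) (h : 0 ≤ n) : numFactorsBU_alt n = fRec n.toNat := by
  by_cases h3 : n < 3
  · have : n.toNat = 0 ∨ n.toNat = 1 ∨ n.toNat = 2 := by omega
    unfold numFactorsBU_alt
    rw [if_pos h3]
    rcases this with h' | h' | h' <;> rw [h'] <;> rfl
  · unfold numFactorsBU_alt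
    rw [if_neg h3]
    have hP : matPowBin mIdent mComp (n - 3).toNat = mnpow mComp (n - 3).toNat := by
      rw [matPowBin_eq, mmul_ident_left]
    have hv := mnpow_fVec (n - 3).toNat
    have hf0 : fVec 0 = ((2 : Int), (1 : Int), (1 : Int), (1 : Int)) := rfl
    rw [hf0] at hv
    have h1 := congrArg Prod.fst hv
    simp only [mvec, fVec] at h1
    simp only [hP]
    rw [show n.toNat = (n - 3).toNat + 3 from by omega]
    rw [← h1]; ring

-- A-side: the DP loop.  step/dp0 mirror the port's foldl (definitionally equal to its lambda)
def stepA (dp : Array Int) (i : Int) : Array Int :=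
  if i < 3 then dp.set! i.toNat 1
  else if i = 3 then dp.set! i.toNat 2
  else dp.set! i.toNat
    (dp[(i - 1).toNat]! + dp[(i - 3).toNat]! + dp[(i - 4).toNat]!)

def dp0 (N : Nat) : Array Int := ((PySem.List.pyRange 0 ((N : Int) + 1) 1).map (fun _ => (-1 : Int))).toArray

theorem size_dp0 (N : Nat) : (dp0 N).size = N + 1 := by
  simp [dp0, PySem.List.length_pyRange_one]

theorem size_stepA (dp : Array Int) (i : Int) : (stepA dp i).size = dp.size := by
  unfold stepA
  split_ifs <;> simp [Array.set!]

theorem loopA (N : Nat) (m : Nat) (hm : m ≤ N + 1) :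
    ((PySem.List.pyRange 0 (m : Int) 1).foldl stepA (dp0 N)).size = N + 1 ∧
    ∀ k : Nat, k < m → ((PySem.List.pyRange 0 (m : Int) 1).foldl stepA (dp0 N))[k]? = some (fRec k) := by
  induction m with
  | zero =>
    rw [PySem.List.pyRange_one_eq_nil (by omega)]
    exact ⟨size_dp0 N, fun k hk => absurd hk (by omega)⟩
  | succ m ih =>
    obtain ⟨ihlen, ihval⟩ := ih (by omega)
    rw [show ((m + 1 : Nat) : Int) = (m : Int) + 1 from by push_cast; ring,
        PySem.List.pyRange_one_succ_right (by positivity), List.foldl_append]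
    set dp := (PySem.List.pyRange 0 (m : Int) 1).foldl stepA (dp0 N) with hdp
    simp only [List.foldl]
    have hmlt : m < dp.size := by omega
    have hlen : (stepA dp (m : Int)).size = N + 1 := by rw [size_stepA, ihlen]
    refine ⟨hlen, fun k hk => ?_⟩
    have hsetb : ∀ (j : Nat) (v : Int), dp.set! j v = dp.setIfInBounds j v := fun _ _ => rfl
    have htm : ((m : Int)).toNat = m := by omega
    unfold stepA
    by_cases hm3 : m < 3
    · rw [if_pos (show (m : Int) < 3 from by omega), htm, hsetb, Array.getElem?_setIfInBounds]
      by_cases hkm : m = k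
      · rw [if_pos hkm, if_pos hmlt]
        have h012 : m = 0 ∨ m = 1 ∨ m = 2 := by omega
        rcases h012 with h' | h' | h' <;> rw [← hkm, h'] <;> rfl
      · rw [if_neg hkm]; exact ihval k (by omega)
    · rw [if_neg (show ¬ ((m : Int) < 3) from by omega)]
      by_cases hm3' : m = 3
      · rw [if_pos (show (m : Int) = 3 from by omega), htm, hsetb, Array.getElem?_setIfInBounds]
        by_cases hkm : m = k
        · rw [if_pos hkm, if_pos hmlt, ← hkm, hm3']; rfl
        · rw [if_neg hkm]; exact ihval k (by omega)
      · rw [if_neg (show ¬ ((m : Int) = 3) from by omega), htm,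
            show ((m : Int) - 1).toNat = m - 1 from by omega,
            show ((m : Int) - 3).toNat = m - 3 from by omega,
            show ((m : Int) - 4).toNat = m - 4 from by omega]
        have hread : ∀ j : Nat, j < m → dp[j]! = fRec j := by
          intro j hj
          have h := ihval j hj
          rw [Array.getElem?_eq_getElem (by omega)] at h
          rw [getElem!_pos dp j (by omega)]
          exact Option.some.inj h
        rw [hread (m - 1) (by omega), hread (m - 3) (by omega), hread (m - 4) (by omega),
            hsetb, Array.getElem?_setIfInBounds]
        by_cases hkm : m = k
        · rw [if_pos hkm, if_pos hmlt, ← hkm]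
          have hrec : fRec m = fRec (m - 1) + fRec (m - 3) + fRec (m - 4) := by
            conv_lhs => rw [show m = m - 4 + 4 from by omega]
            rw [fRec_add_four, show m - 4 + 3 = m - 1 from by omega,
                show m - 4 + 1 = m - 3 from by omega]
          rw [hrec]
        · rw [if_neg hkm]; exact ihval k (by omega)

theorem a_eq_fRec (n : Int) (h : 0 ≤ n) : numFactorsBU n = fRec n.toNat := by
  obtain ⟨N, rfl⟩ : ∃ N : Nat, n = (N : Int) := ⟨n.toNat, by omega⟩
  have hfold : ((PySem.List.pyRange 0 ((N : Int) + 1) 1).foldl stepA (dp0 N)).size = N + 1 ∧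
      ∀ k : Nat, k < N + 1 →
        ((PySem.List.pyRange 0 ((N : Int) + 1) 1).foldl stepA (dp0 N))[k]? = some (fRec k) := by
    rw [show (N : Int) + 1 = ((N + 1 : Nat) : Int) from by push_cast; ring]
    exact loopA N (N + 1) (le_refl _)
  obtain ⟨hlen', hval'⟩ := hfold
  unfold numFactorsBU
  set dp := (PySem.List.pyRange 0 ((N : Int) + 1) 1).foldl stepA (dp0 N) with hdp
  show (PySem.List.pyGet? dp.toList (N : Int)).getD 0 = fRec (N : Int).toNat
  rw [PySem.List.pyGet?_natCast, Array.getElem?_toList, hval' N (by omega),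
      show (N : Int).toNat = N from by omega]
  rfl

-- ===== VERDICT (by name: the statement is the Claim_ definition above) =====
theorem numFactorsBU_spec : Claim_equal_numFactorsBU := by
  intro n _ hp
  unfold Spec_numFactorsBU
  rw [a_eq_fRec n hp, alt_eq_fRec n hp]
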